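-- pv_equiv track=rewrite | github.com/almondheil/wiki2md | wiki2md.py | handle_inline_features
-- ===== SOURCE A (Python) =====
-- def handle_inline_features(l):
--     words = l.split(' ')
--     output_words = words
--
--     in_code = False
--     for index, w in enumerate(words):
--         # toggle whether we're in a code block
--         if w.__contains__('`'):
--             in_code = not in_code
--             # no replacement here
--
--         # skip if we're parsing code right now
--         if in_code:
--             pass
--
--         if w.__contains__('*'):
--             w = w.replace('*', '**')
--
--         if w.__contains__('_'):
--             w = w.replace('_', '*')
--
--         # update output for word
--         output_words[index] = w
--
--     return ' '.join(output_words)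
-- ===== SOURCE B (Python) =====
-- def handle_inline_features(l):
--     return l.replace('*', '**').replace('_', '*')
-- ===== Notes on version B (the rewrite author's own statement) =====
-- stated objective: simpler
-- what changed: B drops the split/enumerate/in-place-update/join loop (and the dead in_code toggle) and returns two chained whole-string replacements, exact because neither replacement target or result spans a space.
import Mathlib
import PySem

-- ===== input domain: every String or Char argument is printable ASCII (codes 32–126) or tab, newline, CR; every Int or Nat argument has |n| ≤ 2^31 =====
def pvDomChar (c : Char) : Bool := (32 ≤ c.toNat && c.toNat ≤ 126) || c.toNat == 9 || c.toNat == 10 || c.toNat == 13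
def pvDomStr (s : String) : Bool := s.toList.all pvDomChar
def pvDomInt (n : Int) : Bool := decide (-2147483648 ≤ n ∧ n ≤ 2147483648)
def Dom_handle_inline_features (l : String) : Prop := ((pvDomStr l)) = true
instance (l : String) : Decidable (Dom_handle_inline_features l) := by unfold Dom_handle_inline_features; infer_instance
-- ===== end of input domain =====

-- B replaces A's split/enumerate/in-place-update/join loop (with its dead in_code toggle)
-- by two chained whole-string replacements; proved equal on all printable-ASCII inputs.


-- ===== PORT A =====
-- Python's enumerate(words)
def pvEnum {α : Type} (n : Nat) : List α → List (Nat × α)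
  | [] => []
  | x :: xs => (n, x) :: pvEnum (n + 1) xs

-- the body of A's for-loop: state = (output_words, in_code)
def pvALoop : List (Nat × String) → List String → Bool → List String
  | [], out, _ => out
  | (index, w) :: rest, out, in_code =>
    -- toggle whether we're in a code block
    let in_code := if PySem.Str.isIn "`" w then !in_code else in_code
    -- if in_code: pass  (no effect)
    let w := if PySem.Str.isIn "*" w then PySem.Str.replace w "*" "**" else w
    let w := if PySem.Str.isIn "_" w then PySem.Str.replace w "_" "*" else w
    -- update output for word
    pvALoop rest (PySem.List.pySetD out (index : Int) w) in_code

def handle_inline_features (l : String) : String :=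
  let words := (PySem.Str.split? l " ").getD []   -- sep " " is nonempty, so split? is always `some`
  let output_words := words
  PySem.Str.join " " (pvALoop (pvEnum 0 words) output_words false)

-- ===== PORT B =====
def handle_inline_features_alt (l : String) : String :=
  PySem.Str.replace (PySem.Str.replace l "*" "**") "_" "*"

-- ===== PRECONDITION & SPEC =====
def Spec_handle_inline_features (l : String) (out : String) : Prop := out = handle_inline_features_alt l
instance (l : String) (out : String) : Decidable (Spec_handle_inline_features l out) := by unfold Spec_handle_inline_features; infer_instance

-- ===== CLAIM (what is proved, stated in full; the proofs are below) =====
def Claim_equal_handle_inline_features : Prop := ∀ (l : String), Dom_handle_inline_features l → Spec_handle_inline_features l (handle_inline_features l)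

-- ===== LEMMAS AND PROOFS =====

-- character substitutions underlying the two replaces
def pvG1 (c : Char) : List Char := if c = '*' then ['*', '*'] else [c]
def pvG2 (c : Char) : List Char := if c = '_' then ['*'] else [c]

-- single-char replace is a flatMap
theorem pv_replace_go_single (a : Char) (r : List Char) :
    ∀ (l : List Char) (fuel : Nat) (acc : List Char), l.length ≤ fuel →
      PySem.Chars.replace.go [a] r fuel l acc
        = acc.reverse ++ l.flatMap (fun c => if c = a then r else [c]) := by
  intro l
  induction l with
  | nil => intro fuel acc _; cases fuel <;> simp [PySem.Chars.replace.go]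
  | cons c t ih =>
    intro fuel acc h
    cases fuel with
    | zero => simp at h
    | succ fuel =>
      simp only [PySem.Chars.replace.go]
      by_cases hc : c = a
      · subst hc
        rw [if_pos (by simp [List.isPrefixOf])]
        simp only [List.length_cons, List.length_nil, List.drop_succ_cons, List.drop_zero]
        rw [ih fuel (r.reverse ++ acc) (by simpa using h)]
        simp
      · rw [if_neg (by simp [List.isPrefixOf, Ne.symm hc])]
        rw [ih fuel (c :: acc) (by simpa using h)]
        simp [hc]

theorem pv_replace_single (cs : List Char) (a : Char) (r : List Char) :
    PySem.Chars.replace cs [a] r = cs.flatMap (fun c => if c = a then r else [c]) := by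
  simpa using pv_replace_go_single a r cs cs.length [] le_rfl

-- the `contains` guard around a replace collapses: absent char means flatMap is the identity
theorem pv_guarded_replace (cs : List Char) (a : Char) (r : List Char) :
    (if PySem.Chars.isIn [a] cs then PySem.Chars.replace cs [a] r else cs)
      = cs.flatMap (fun c => if c = a then r else [c]) := by
  by_cases h : PySem.Chars.isIn [a] cs = true
  · simp [h, pv_replace_single]
  · rw [if_neg (by simp [h])]
    have hmem : a ∉ cs := by
      intro hm
      exact (PySem.Chars.isIn_eq_false_iff _ _ |>.mp (by simpa using h))
        ((List.singleton_infix_iff a cs).mpr hm)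
    induction cs with
    | nil => simp
    | cons c t iht =>
      have hc : c ≠ a := fun e => hmem (e ▸ List.mem_cons_self)
      have ht : PySem.Chars.isIn [a] t = false := by
        rw [PySem.Chars.isIn_eq_false_iff]
        intro hinf
        exact hmem (List.mem_cons_of_mem _ ((List.singleton_infix_iff a t).mp hinf))
      simp only [List.flatMap_cons, if_neg hc]
      rw [← iht (by simp [ht]) (fun hm => hmem (List.mem_cons_of_mem _ hm))]
      simp

-- join over a cons with nonempty tail
theorem pv_join_cons (sep x : List Char) (L : List (List Char)) (h : L ≠ []) :
    PySem.Chars.join sep (x :: L) = x ++ sep ++ PySem.Chars.join sep L := by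
  cases L with
  | nil => exact absurd rfl h
  | cons y ys => exact PySem.Chars.join_cons_cons sep x y ys

-- merging the last two pieces across the separator
theorem pv_join_merge (sep : List Char) (xs : List (List Char)) (u v : List Char) :
    PySem.Chars.join sep (xs ++ [u, v]) = PySem.Chars.join sep (xs ++ [u ++ sep ++ v]) := by
  induction xs with
  | nil => simp [PySem.Chars.join_cons_cons, PySem.Chars.join_singleton]
  | cons x xs ih =>
    rw [List.cons_append, List.cons_append,
      pv_join_cons sep x (xs ++ [u, v]) (by simp),
      pv_join_cons sep x (xs ++ [u ++ sep ++ v]) (by simp), ih]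

-- join ∘ splitOn.go reassembles the input
theorem pv_join_splitOn_go (sep : List Char) (hsep : sep ≠ []) :
    ∀ (fuel : Nat) (l cur : List Char) (acc : List (List Char)),
      l.length ≤ fuel →
      PySem.Chars.join sep (PySem.Chars.splitOn.go sep fuel l cur acc)
        = PySem.Chars.join sep (acc.reverse ++ [cur.reverse ++ l]) := by
  intro fuel
  induction fuel with
  | zero => intro l cur acc h; simp at h; subst h; simp [PySem.Chars.splitOn.go]
  | succ fuel ih =>
    intro l cur acc h
    cases l with
    | nil => simp [PySem.Chars.splitOn.go]
    | cons c t =>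
      simp only [PySem.Chars.splitOn.go]
      by_cases hp : sep.isPrefixOf (c :: t) = true
      · rw [if_pos hp]
        have hlen : sep.length ≤ (c :: t).length :=
          (List.IsPrefix.length_le (List.isPrefixOf_iff_prefix.mp hp))
        have hsl : 1 ≤ sep.length := by
          cases sep with
          | nil => exact absurd rfl hsep
          | cons _ _ => simp
        rw [ih (List.drop sep.length (c :: t)) [] (cur.reverse :: acc)
          (by simp only [List.length_drop]; simp at h ⊢; omega)]
        simp only [List.reverse_cons, List.reverse_nil, List.nil_append, List.append_assoc]
        have hmerge : PySem.Chars.join sep (acc.reverse ++ [cur.reverse, List.drop sep.length (c :: t)])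
            = PySem.Chars.join sep (acc.reverse ++ [cur.reverse ++ sep ++ List.drop sep.length (c :: t)]) :=
          pv_join_merge sep acc.reverse cur.reverse (List.drop sep.length (c :: t))
        rw [show ([cur.reverse] ++ [List.drop sep.length (c :: t)])
            = [cur.reverse, List.drop sep.length (c :: t)] from rfl, hmerge]
        congr 2
        have hpre : sep ++ List.drop sep.length (c :: t) = c :: t :=
          List.prefix_iff_eq_append.mp (List.isPrefixOf_iff_prefix.mp hp)
        conv_rhs => rw [← hpre]
        simp
      · rw [if_neg hp, ih t (c :: cur) acc (by simpa using h)]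
        simp

theorem pv_join_splitOn (sep cs : List Char) (hsep : sep ≠ []) :
    PySem.Chars.join sep (PySem.Chars.splitOn cs sep) = cs := by
  unfold PySem.Chars.splitOn
  rw [pv_join_splitOn_go sep hsep (cs.length + 1) cs [] [] (by omega)]
  simp [PySem.Chars.join_singleton]

-- flatMap with g sep-fixed distributes over the join
theorem pv_flatMap_join (g : Char → List Char) (s : Char) (hs : g s = [s]) :
    ∀ (L : List (List Char)),
      (PySem.Chars.join [s] L).flatMap g = PySem.Chars.join [s] (L.map (fun p => p.flatMap g)) := by
  intro L
  induction L with
  | nil => simp [PySem.Chars.join_nil]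
  | cons x L ih =>
    cases L with
    | nil => simp [PySem.Chars.join_singleton]
    | cons y ys =>
      rw [PySem.Chars.join_cons_cons, List.map_cons,
        pv_join_cons [s] (x.flatMap g) ((y :: ys).map (fun p => p.flatMap g)) (by simp)]
      simp only [List.flatMap_append, ih]
      simp [hs]

-- A's per-word transformation, as the port performs it
def pvFS (w : String) : String :=
  let w1 := if PySem.Str.isIn "*" w then PySem.Str.replace w "*" "**" else w
  if PySem.Str.isIn "_" w1 then PySem.Str.replace w1 "_" "*" else w1

theorem pv_guard_toList (w' : String) (cs : List Char) (hw : w'.toList = cs)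
    (a : Char) (r : List Char) :
    (if PySem.Chars.isIn [a] cs = true then String.ofList (PySem.Chars.replace cs [a] r) else w').toList
      = cs.flatMap (fun c => if c = a then r else [c]) := by
  by_cases h : PySem.Chars.isIn [a] cs = true
  · rw [if_pos h, String.toList_ofList, ← pv_guarded_replace, if_pos h]
  · rw [if_neg h, hw, ← pv_guarded_replace, if_neg h]

theorem pv_fS_toList (w : String) :
    (pvFS w).toList = (w.toList.flatMap pvG1).flatMap pvG2 := by
  have h1 : (if PySem.Str.isIn "*" w then PySem.Str.replace w "*" "**" else w).toList
      = w.toList.flatMap pvG1 := pv_guard_toList w w.toList rfl '*' ['*', '*']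
  have h2 : (pvFS w).toList
      = (if PySem.Str.isIn "*" w then PySem.Str.replace w "*" "**" else w).toList.flatMap pvG2 :=
    pv_guard_toList (if PySem.Str.isIn "*" w then PySem.Str.replace w "*" "**" else w) _ rfl '_' ['*']
  rw [h2, h1]

-- the loop is a map of pvFS over the suffix not yet processed
theorem pv_loop_map : ∀ (rest pre : List String) (b : Bool),
    pvALoop (pvEnum pre.length rest) (pre ++ rest) b = pre ++ rest.map pvFS := by
  intro rest
  induction rest with
  | nil => intro pre b; simp [pvEnum, pvALoop]
  | cons w rest ih =>
    intro pre b
    simp only [pvEnum, pvALoop]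
    have hset : PySem.List.pySetD (pre ++ w :: rest) (pre.length : Int) (pvFS w)
        = (pre ++ [pvFS w]) ++ rest := by
      rw [PySem.List.pySetD_natCast]
      rw [List.set_append_right _ _ (le_refl pre.length)]
      simp
    rw [show (let in_code := if PySem.Str.isIn "`" w then !b else b
        let w' := if PySem.Str.isIn "*" w then PySem.Str.replace w "*" "**" else w
        let w'' := if PySem.Str.isIn "_" w' then PySem.Str.replace w' "_" "*" else w'
        pvALoop (pvEnum (pre.length + 1) rest) (PySem.List.pySetD (pre ++ w :: rest) (pre.length : Int) w'')
          in_code)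
      = pvALoop (pvEnum (pre.length + 1) rest)
          (PySem.List.pySetD (pre ++ w :: rest) (pre.length : Int) (pvFS w))
          (if PySem.Str.isIn "`" w then !b else b) from rfl]
    rw [hset]
    have : pre.length + 1 = (pre ++ [pvFS w]).length := by simp
    rw [this, ih (pre ++ [pvFS w]) _]
    simp

-- ===== VERDICT (by name: the statement is the Claim_ definition above) =====
theorem handle_inline_features_spec : Claim_equal_handle_inline_features := by
  intro l _
  unfold Spec_handle_inline_features
  have hsplit : (PySem.Str.split? l " ").getD []
      = (PySem.Chars.splitOn l.toList [' ']).map String.ofList := by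
    simp [PySem.Str.split?, PySem.Chars.split?, show (" " : String).toList = [' '] from rfl]
  have hloop := pv_loop_map ((PySem.Chars.splitOn l.toList [' ']).map String.ofList) [] false
  simp only [List.length_nil, List.nil_append] at hloop
  rw [show handle_inline_features l
      = PySem.Str.join " " (pvALoop (pvEnum 0 ((PySem.Str.split? l " ").getD []))
          ((PySem.Str.split? l " ").getD []) false) from rfl]
  rw [hsplit, hloop]
  rw [show handle_inline_features_alt l
      = PySem.Str.replace (PySem.Str.replace l "*" "**") "_" "*" from rfl]
  apply String.toList_inj.mp
  rw [show (PySem.Str.join " "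
      (((PySem.Chars.splitOn l.toList [' ']).map String.ofList).map pvFS)).toList
    = PySem.Chars.join [' ']
        ((((PySem.Chars.splitOn l.toList [' ']).map String.ofList).map pvFS).map String.toList)
    from by simp [PySem.Str.join, String.toList_ofList, show (" " : String).toList = [' '] from rfl]]
  rw [show (PySem.Str.replace (PySem.Str.replace l "*" "**") "_" "*").toList
      = PySem.Chars.replace (PySem.Chars.replace l.toList ['*'] ['*', '*']) ['_'] ['*'] from by
    simp [PySem.Str.replace, String.toList_ofList]]
  rw [pv_replace_single, pv_replace_single]
  have hmaps : (((PySem.Chars.splitOn l.toList [' ']).map String.ofList).map pvFS).map String.toList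
      = (PySem.Chars.splitOn l.toList [' ']).map (fun p => (p.flatMap pvG1).flatMap pvG2) := by
    simp only [List.map_map]
    apply List.map_congr_left
    intro p _
    simp [Function.comp, pv_fS_toList, String.toList_ofList]
  rw [hmaps]
  have h2 : (PySem.Chars.splitOn l.toList [' ']).map (fun p => (p.flatMap pvG1).flatMap pvG2)
      = ((PySem.Chars.splitOn l.toList [' ']).map (fun p => p.flatMap pvG1)).map
          (fun p => p.flatMap pvG2) := by simp [List.map_map, Function.comp]
  rw [h2,
    ← pv_flatMap_join pvG2 ' ' (by simp [pvG2]) ((PySem.Chars.splitOn l.toList [' ']).map (fun p => p.flatMap pvG1)),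
    ← pv_flatMap_join pvG1 ' ' (by simp [pvG1]) (PySem.Chars.splitOn l.toList [' ']),
    pv_join_splitOn _ _ (by simp)]
  rw [show pvG1 = (fun c => if c = '*' then ['*', '*'] else [c]) from rfl,
    show pvG2 = (fun c => if c = '_' then ['*'] else [c]) from rfl]
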